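-- pv_equiv track=rewrite | github.com/Flynarch/OMNI-ENGINE | engine/systems/jobs.py | _occ_profile
-- ===== SOURCE A (Python) =====
-- def _occ_profile(occ: str) -> tuple[str, str]:
--     o = str(occ or "").strip().lower()
--     # map to (req_skill, vibe)
--     if any(k in o for k in ("hack", "hacker", "it", "cyber", "program", "engineer", "dev")):
--         return ("hacking", "Data Extraction")
--     if any(k in o for k in ("driver", "courier", "delivery", "rideshare", "taxi", "pilot")):
--         return ("driving", "Courier Run")
--     if any(k in o for k in ("med", "doctor", "nurse", "paramedic")):
--         return ("medical", "Emergency Shift")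
--     if any(k in o for k in ("social", "sales", "negotiat", "lawyer", "diplomat", "recruit")):
--         return ("social", "Client Negotiation")
--     if any(k in o for k in ("guard", "security", "soldier", "combat", "merc")):
--         return ("combat", "Protection Detail")
--     if any(k in o for k in ("stealth", "spy", "thief", "infiltrat")):
--         return ("stealth", "Quiet Retrieval")
--     return ("streetwise", "Odd Job")
-- ===== SOURCE B (Python) =====
-- _KW = {
--     "hack": 0, "hacker": 0, "it": 0, "cyber": 0, "program": 0, "engineer": 0, "dev": 0,
--     "driver": 1, "courier": 1, "delivery": 1, "rideshare": 1, "taxi": 1, "pilot": 1,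
--     "med": 2, "doctor": 2, "nurse": 2, "paramedic": 2,
--     "social": 3, "sales": 3, "negotiat": 3, "lawyer": 3, "diplomat": 3, "recruit": 3,
--     "guard": 4, "security": 4, "soldier": 4, "combat": 4, "merc": 4,
--     "stealth": 5, "spy": 5, "thief": 5, "infiltrat": 5,
-- }
-- _PROFILES = [
--     ("hacking", "Data Extraction"),
--     ("driving", "Courier Run"),
--     ("medical", "Emergency Shift"),
--     ("social", "Client Negotiation"),
--     ("combat", "Protection Detail"),
--     ("stealth", "Quiet Retrieval"),
--     ("streetwise", "Odd Job"),
-- ]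
-- _MAXLEN = 9  # longest keyword ("rideshare", "infiltrat")
--
--
-- def _occ_profile(occ: str) -> tuple[str, str]:
--     # Single left-to-right scan: at every suffix, hash-look-up each prefix of
--     # length 1.._MAXLEN in the flat keyword->priority dict and keep the minimum
--     # priority seen; no per-keyword substring search at all.
--     o = str(occ or "").strip().lower()
--     best = len(_PROFILES) - 1
--     s = o
--     while s:
--         for L in range(1, _MAXLEN + 1):
--             p = _KW.get(s[:L])
--             if p is not None and p < best:
--                 best = p
--         s = s[1:]
--     return _PROFILES[best]
-- ===== Notes on version B (the rewrite author's own statement) =====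
-- stated objective: alternative
-- what changed: Instead of A's six-branch cascade of per-keyword substring searches, B makes one left-to-right scan of the string, hash-looks-up every window of length 1..9 in a single flat keyword->priority dict, and keeps the minimum priority seen, which equals A's first matching branch.
import Mathlib
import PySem

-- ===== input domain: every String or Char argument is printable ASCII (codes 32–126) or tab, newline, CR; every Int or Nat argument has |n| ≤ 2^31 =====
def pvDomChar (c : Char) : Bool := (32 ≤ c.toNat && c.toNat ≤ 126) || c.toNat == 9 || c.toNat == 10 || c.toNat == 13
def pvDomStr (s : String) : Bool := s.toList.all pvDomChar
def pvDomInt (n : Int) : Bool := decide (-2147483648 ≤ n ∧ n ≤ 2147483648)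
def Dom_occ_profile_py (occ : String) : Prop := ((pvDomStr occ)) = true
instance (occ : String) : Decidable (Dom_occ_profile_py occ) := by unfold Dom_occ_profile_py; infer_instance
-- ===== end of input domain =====

-- B replaces A's cascade of per-keyword substring searches by a single left-to-right scan of the
-- string that hash-looks-up every window of length 1..9 in one flat keyword->priority dict and
-- keeps the minimum priority (objective: alternative); same results on all inputs.

-- ===== PORT A =====
def occ_profile_py (occ : String) : String × String :=
  let o := PySem.Str.lower (PySem.Str.strip (if occ == "" then "" else occ))
  if ["hack", "hacker", "it", "cyber", "program", "engineer", "dev"].any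
      (fun k => PySem.Str.isIn k o) then ("hacking", "Data Extraction")
  else if ["driver", "courier", "delivery", "rideshare", "taxi", "pilot"].any
      (fun k => PySem.Str.isIn k o) then ("driving", "Courier Run")
  else if ["med", "doctor", "nurse", "paramedic"].any
      (fun k => PySem.Str.isIn k o) then ("medical", "Emergency Shift")
  else if ["social", "sales", "negotiat", "lawyer", "diplomat", "recruit"].any
      (fun k => PySem.Str.isIn k o) then ("social", "Client Negotiation")
  else if ["guard", "security", "soldier", "combat", "merc"].any
      (fun k => PySem.Str.isIn k o) then ("combat", "Protection Detail")
  else if ["stealth", "spy", "thief", "infiltrat"].any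
      (fun k => PySem.Str.isIn k o) then ("stealth", "Quiet Retrieval")
  else ("streetwise", "Odd Job")

-- ===== PORT B =====
-- flat keyword -> priority dict _KW (strings as their char lists)
def pvKW : PySem.Dict (List Char) Nat :=
  PySem.Dict.ofList
    [("hack".toList, 0), ("hacker".toList, 0), ("it".toList, 0), ("cyber".toList, 0),
     ("program".toList, 0), ("engineer".toList, 0), ("dev".toList, 0),
     ("driver".toList, 1), ("courier".toList, 1), ("delivery".toList, 1),
     ("rideshare".toList, 1), ("taxi".toList, 1), ("pilot".toList, 1),
     ("med".toList, 2), ("doctor".toList, 2), ("nurse".toList, 2), ("paramedic".toList, 2),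
     ("social".toList, 3), ("sales".toList, 3), ("negotiat".toList, 3), ("lawyer".toList, 3),
     ("diplomat".toList, 3), ("recruit".toList, 3),
     ("guard".toList, 4), ("security".toList, 4), ("soldier".toList, 4), ("combat".toList, 4),
     ("merc".toList, 4),
     ("stealth".toList, 5), ("spy".toList, 5), ("thief".toList, 5), ("infiltrat".toList, 5)]

def pvProfiles : List (String × String) :=
  [("hacking", "Data Extraction"), ("driving", "Courier Run"), ("medical", "Emergency Shift"),
   ("social", "Client Negotiation"), ("combat", "Protection Detail"),
   ("stealth", "Quiet Retrieval"), ("streetwise", "Odd Job")]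

-- the inner 'for L in range(1, _MAXLEN + 1)' loop body: p = _KW.get(s[:L]); keep the minimum
def pvF (s : List Char) (best : Nat) (L : Int) : Nat :=
  match pvKW.get? (PySem.List.slice s none (some L)) with
  | some p => if p < best then p else best
  | none => best

def pvStep (s : List Char) (best : Nat) : Nat :=
  (PySem.List.pyRange 1 10 1).foldl (pvF s) best

-- the 'while s: ...; s = s[1:]' loop
def pvScan : List Char → Nat → Nat
  | [], best => best
  | c :: rest, best => pvScan rest (pvStep (c :: rest) best)

def occ_profile_py_alt (occ : String) : String × String :=
  let o := PySem.Str.lower (PySem.Str.strip (if occ == "" then "" else occ))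
  pvProfiles.getD (pvScan o.toList (pvProfiles.length - 1)) ("", "")

-- ===== PRECONDITION & SPEC =====
def Spec_occ_profile_py (occ : String) (out : String × String) : Prop := out = occ_profile_py_alt occ
instance (occ : String) (out : String × String) : Decidable (Spec_occ_profile_py occ out) := by unfold Spec_occ_profile_py; infer_instance

-- ===== CLAIM (what is proved, stated in full; the proofs are below) =====
def Claim_equal_occ_profile_py : Prop := ∀ (occ : String), Dom_occ_profile_py occ → Spec_occ_profile_py occ (occ_profile_py occ)

-- ===== LEMMAS AND PROOFS =====

-- 'keyword kp.1 of priority kp.2 occurs somewhere in t'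
def pvMatch (t : List Char) (q : Nat) : Prop :=
  ∃ kp ∈ pvKW.items, kp.2 = q ∧ PySem.Chars.isIn kp.1 t = true

-- 'keyword kp.1 of priority kp.2 is a prefix of s'
def pvPrefMatch (s : List Char) (q : Nat) : Prop :=
  ∃ kp ∈ pvKW.items, kp.2 = q ∧ kp.1 <+: s

set_option maxRecDepth 100000 in
lemma pvKW_nodup : pvKW.keys.Nodup := by decide

set_option maxRecDepth 100000 in
lemma pvKW_len : ∀ kp ∈ pvKW.items, 1 ≤ kp.1.length ∧ kp.1.length ≤ 9 := by decide

lemma pvFold_spec (s : List Char) :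
    ∀ (Ls : List Int), (∀ L ∈ Ls, 0 ≤ L) → ∀ (best : Nat),
      Ls.foldl (pvF s) best ≤ best ∧
      (Ls.foldl (pvF s) best = best ∨ pvPrefMatch s (Ls.foldl (pvF s) best)) ∧
      (∀ L ∈ Ls, ∀ p, pvKW.get? (PySem.List.slice s none (some L)) = some p →
        Ls.foldl (pvF s) best ≤ p) := by
  intro Ls
  induction Ls with
  | nil => intro _ best; exact ⟨le_refl _, Or.inl rfl, by intro L hL; cases hL⟩
  | cons L Ls ih =>
    intro hpos best
    have hL0 : 0 ≤ L := hpos L (List.mem_cons_self ..)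
    have ihp : ∀ L' ∈ Ls, 0 ≤ L' := fun L' h => hpos L' (List.mem_cons_of_mem _ h)
    simp only [List.foldl_cons]
    rcases hget : pvKW.get? (PySem.List.slice s none (some L)) with _ | p
    · have hF : pvF s best L = best := by unfold pvF; rw [hget]
      rw [hF]
      obtain ⟨h1, h2, h3⟩ := ih ihp best
      refine ⟨h1, h2, ?_⟩
      intro L' hL' p hp
      rcases List.mem_cons.mp hL' with rfl | hL'
      · rw [hget] at hp; cases hp
      · exact h3 L' hL' p hp
    · have hmem : (PySem.List.slice s none (some L), p) ∈ pvKW.items :=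
        PySem.Dict.mem_items_of_get?_eq_some _ hget
      have hpre : PySem.List.slice s none (some L) <+: s := by
        rw [PySem.List.slice_to _ hL0]; exact List.take_prefix _ _
      have hF : pvF s best L = if p < best then p else best := by unfold pvF; rw [hget]
      rw [hF]
      by_cases hpb : p < best
      · rw [if_pos hpb]
        obtain ⟨h1, h2, h3⟩ := ih ihp p
        refine ⟨le_trans h1 (by omega), ?_, ?_⟩
        · rcases h2 with h2 | h2
          · exact Or.inr ⟨_, hmem, h2.symm, hpre⟩
          · exact Or.inr h2
        · intro L' hL' q hq
          rcases List.mem_cons.mp hL' with rfl | hL'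
          · rw [hget] at hq
            injection hq with hq
            omega
          · exact h3 L' hL' q hq
      · rw [if_neg hpb]
        obtain ⟨h1, h2, h3⟩ := ih ihp best
        refine ⟨h1, h2, ?_⟩
        intro L' hL' q hq
        rcases List.mem_cons.mp hL' with rfl | hL'
        · rw [hget] at hq
          injection hq with hq
          omega
        · exact h3 L' hL' q hq

lemma pvStep_spec (s : List Char) (best : Nat) :
    pvStep s best ≤ best ∧
    (pvStep s best = best ∨ pvPrefMatch s (pvStep s best)) ∧
    (∀ kp ∈ pvKW.items, kp.1 <+: s → pvStep s best ≤ kp.2) := by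
  unfold pvStep
  have hpos : ∀ L ∈ PySem.List.pyRange 1 10 1, 0 ≤ L := by decide
  obtain ⟨h1, h2, h3⟩ := pvFold_spec s (PySem.List.pyRange 1 10 1) hpos best
  refine ⟨h1, h2, ?_⟩
  rintro ⟨k, v⟩ hkp hpre
  obtain ⟨hlen1, hlen9⟩ := pvKW_len _ hkp
  have hmemL : ((k.length : Int)) ∈ PySem.List.pyRange 1 10 1 := by
    rw [PySem.List.mem_pyRange_one]
    constructor
    · exact_mod_cast hlen1
    · exact_mod_cast Nat.lt_of_le_of_lt hlen9 (by omega)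
  have hslice : PySem.List.slice s none (some (k.length : Int)) = k := by
    rw [PySem.List.slice_to_natCast]
    exact (List.prefix_iff_eq_take.mp hpre).symm
  have hget : pvKW.get? (PySem.List.slice s none (some (k.length : Int))) = some v := by
    rw [hslice]
    exact PySem.Dict.get?_of_mem_items _ hkp pvKW_nodup
  exact h3 _ hmemL _ hget

lemma pvScan_spec : ∀ (t : List Char) (best : Nat),
    pvScan t best ≤ best ∧
    (pvScan t best = best ∨ pvMatch t (pvScan t best)) ∧
    (∀ kp ∈ pvKW.items, PySem.Chars.isIn kp.1 t = true → pvScan t best ≤ kp.2) := by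
  intro t
  induction t with
  | nil =>
    intro best
    refine ⟨le_refl _, Or.inl rfl, ?_⟩
    intro kp hkp hin
    exfalso
    have hinf := (PySem.Chars.isIn_iff_infix _ _).mp hin
    have hnil : kp.1 = [] := List.eq_nil_of_infix_nil hinf
    have := (pvKW_len kp hkp).1
    rw [hnil] at this; simp at this
  | cons c rest ih =>
    intro best
    simp only [pvScan]
    obtain ⟨s1, s2, s3⟩ := pvStep_spec (c :: rest) best
    obtain ⟨h1, h2, h3⟩ := ih (pvStep (c :: rest) best)
    refine ⟨le_trans h1 s1, ?_, ?_⟩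
    · rcases h2 with h2 | h2
      · rw [h2]
        rcases s2 with s2 | ⟨kp, hkp, hq, hpre⟩
        · exact Or.inl s2
        · exact Or.inr ⟨kp, hkp, hq, (PySem.Chars.isIn_iff_infix _ _).mpr hpre.isInfix⟩
      · obtain ⟨kp, hkp, hq, hin⟩ := h2
        refine Or.inr ⟨kp, hkp, hq, ?_⟩
        rw [PySem.Chars.isIn_iff_infix] at hin ⊢
        exact List.infix_cons_iff.mpr (Or.inr hin)
    · intro kp hkp hin
      rw [PySem.Chars.isIn_iff_infix] at hin
      rcases List.infix_cons_iff.mp hin with hpre | hinf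
      · exact le_trans h1 (s3 kp hkp hpre)
      · exact h3 kp hkp ((PySem.Chars.isIn_iff_infix _ _).mpr hinf)

-- characterize pvMatch as the six group-match booleans of A
set_option maxRecDepth 100000 in
set_option maxHeartbeats 2000000 in
lemma pvMatch_iff (t : List Char) (q : Nat) :
    pvMatch t q ↔
      (q = 0 ∧ ["hack", "hacker", "it", "cyber", "program", "engineer", "dev"].any
          (fun k => PySem.Chars.isIn k.toList t) = true) ∨
      (q = 1 ∧ ["driver", "courier", "delivery", "rideshare", "taxi", "pilot"].any
          (fun k => PySem.Chars.isIn k.toList t) = true) ∨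
      (q = 2 ∧ ["med", "doctor", "nurse", "paramedic"].any
          (fun k => PySem.Chars.isIn k.toList t) = true) ∨
      (q = 3 ∧ ["social", "sales", "negotiat", "lawyer", "diplomat", "recruit"].any
          (fun k => PySem.Chars.isIn k.toList t) = true) ∨
      (q = 4 ∧ ["guard", "security", "soldier", "combat", "merc"].any
          (fun k => PySem.Chars.isIn k.toList t) = true) ∨
      (q = 5 ∧ ["stealth", "spy", "thief", "infiltrat"].any
          (fun k => PySem.Chars.isIn k.toList t) = true) := by
  have hitems : pvKW.items =
    [("hack".toList, 0), ("hacker".toList, 0), ("it".toList, 0), ("cyber".toList, 0),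
     ("program".toList, 0), ("engineer".toList, 0), ("dev".toList, 0),
     ("driver".toList, 1), ("courier".toList, 1), ("delivery".toList, 1),
     ("rideshare".toList, 1), ("taxi".toList, 1), ("pilot".toList, 1),
     ("med".toList, 2), ("doctor".toList, 2), ("nurse".toList, 2), ("paramedic".toList, 2),
     ("social".toList, 3), ("sales".toList, 3), ("negotiat".toList, 3), ("lawyer".toList, 3),
     ("diplomat".toList, 3), ("recruit".toList, 3),
     ("guard".toList, 4), ("security".toList, 4), ("soldier".toList, 4), ("combat".toList, 4),
     ("merc".toList, 4),
     ("stealth".toList, 5), ("spy".toList, 5), ("thief".toList, 5), ("infiltrat".toList, 5)] := rfl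
  unfold pvMatch
  rw [hitems]
  simp only [List.mem_cons, List.not_mem_nil, or_false, List.any_cons, List.any_nil,
    Bool.or_eq_true, Bool.false_eq_true]
  constructor
  · rintro ⟨kp, hkp, hq, hin⟩
    rcases hkp with h|h|h|h|h|h|h|h|h|h|h|h|h|h|h|h|h|h|h|h|h|h|h|h|h|h|h|h|h|h|h|h <;>
      (subst h; subst hq; simp at hin; simp [hin])
  · rintro (⟨rfl, h⟩|⟨rfl, h⟩|⟨rfl, h⟩|⟨rfl, h⟩|⟨rfl, h⟩|⟨rfl, h⟩)
    · rcases h with h|h|h|h|h|h|h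
      exacts [⟨("hack".toList, 0), by simp, rfl, h⟩, ⟨("hacker".toList, 0), by simp, rfl, h⟩, ⟨("it".toList, 0), by simp, rfl, h⟩, ⟨("cyber".toList, 0), by simp, rfl, h⟩, ⟨("program".toList, 0), by simp, rfl, h⟩, ⟨("engineer".toList, 0), by simp, rfl, h⟩, ⟨("dev".toList, 0), by simp, rfl, h⟩]
    · rcases h with h|h|h|h|h|h
      exacts [⟨("driver".toList, 1), by simp, rfl, h⟩, ⟨("courier".toList, 1), by simp, rfl, h⟩, ⟨("delivery".toList, 1), by simp, rfl, h⟩, ⟨("rideshare".toList, 1), by simp, rfl, h⟩, ⟨("taxi".toList, 1), by simp, rfl, h⟩, ⟨("pilot".toList, 1), by simp, rfl, h⟩]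
    · rcases h with h|h|h|h
      exacts [⟨("med".toList, 2), by simp, rfl, h⟩, ⟨("doctor".toList, 2), by simp, rfl, h⟩, ⟨("nurse".toList, 2), by simp, rfl, h⟩, ⟨("paramedic".toList, 2), by simp, rfl, h⟩]
    · rcases h with h|h|h|h|h|h
      exacts [⟨("social".toList, 3), by simp, rfl, h⟩, ⟨("sales".toList, 3), by simp, rfl, h⟩, ⟨("negotiat".toList, 3), by simp, rfl, h⟩, ⟨("lawyer".toList, 3), by simp, rfl, h⟩, ⟨("diplomat".toList, 3), by simp, rfl, h⟩, ⟨("recruit".toList, 3), by simp, rfl, h⟩]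
    · rcases h with h|h|h|h|h
      exacts [⟨("guard".toList, 4), by simp, rfl, h⟩, ⟨("security".toList, 4), by simp, rfl, h⟩, ⟨("soldier".toList, 4), by simp, rfl, h⟩, ⟨("combat".toList, 4), by simp, rfl, h⟩, ⟨("merc".toList, 4), by simp, rfl, h⟩]
    · rcases h with h|h|h|h
      exacts [⟨("stealth".toList, 5), by simp, rfl, h⟩, ⟨("spy".toList, 5), by simp, rfl, h⟩, ⟨("thief".toList, 5), by simp, rfl, h⟩, ⟨("infiltrat".toList, 5), by simp, rfl, h⟩]

-- ===== VERDICT (by name: the statement is the Claim_ definition above) =====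
set_option maxRecDepth 100000 in
set_option maxHeartbeats 2000000 in
theorem occ_profile_py_spec : Claim_equal_occ_profile_py := by
  intro occ _
  unfold Spec_occ_profile_py occ_profile_py occ_profile_py_alt
  dsimp only
  set o := PySem.Str.lower (PySem.Str.strip (if occ == "" then "" else occ)) with ho
  set t := o.toList with ht
  set b0 := ["hack", "hacker", "it", "cyber", "program", "engineer", "dev"].any
      (fun k => PySem.Chars.isIn k.toList t) with hb0
  set b1 := ["driver", "courier", "delivery", "rideshare", "taxi", "pilot"].any
      (fun k => PySem.Chars.isIn k.toList t) with hb1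
  set b2 := ["med", "doctor", "nurse", "paramedic"].any
      (fun k => PySem.Chars.isIn k.toList t) with hb2
  set b3 := ["social", "sales", "negotiat", "lawyer", "diplomat", "recruit"].any
      (fun k => PySem.Chars.isIn k.toList t) with hb3
  set b4 := ["guard", "security", "soldier", "combat", "merc"].any
      (fun k => PySem.Chars.isIn k.toList t) with hb4
  set b5 := ["stealth", "spy", "thief", "infiltrat"].any
      (fun k => PySem.Chars.isIn k.toList t) with hb5
  have hstr : ∀ (ks : List String), ks.any (fun k => PySem.Str.isIn k o)
      = ks.any (fun k => PySem.Chars.isIn k.toList t) := by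
    intro ks; rw [ht]; simp only [PySem.Str.isIn_eq]
  set cIdx := (if b0 = true then 0 else if b1 = true then 1 else if b2 = true then 2
    else if b3 = true then 3 else if b4 = true then 4 else if b5 = true then 5 else 6 : Nat)
    with hc
  have hscan : pvScan t (pvProfiles.length - 1) = cIdx := by
    have hlen : pvProfiles.length - 1 = 6 := rfl
    rw [hlen]
    obtain ⟨h1, h2, h3⟩ := pvScan_spec t 6
    have hle : pvScan t 6 ≤ cIdx := by
      rw [hc]
      split_ifs with g0 g1 g2 g3 g4 g5
      · rw [hb0] at g0
        obtain ⟨kp, hkp, hq, hin⟩ := (pvMatch_iff t 0).mpr (Or.inl ⟨rfl, g0⟩)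
        exact hq ▸ h3 kp hkp hin
      · rw [hb1] at g1
        obtain ⟨kp, hkp, hq, hin⟩ := (pvMatch_iff t 1).mpr (Or.inr (Or.inl ⟨rfl, g1⟩))
        exact hq ▸ h3 kp hkp hin
      · rw [hb2] at g2
        obtain ⟨kp, hkp, hq, hin⟩ :=
          (pvMatch_iff t 2).mpr (Or.inr (Or.inr (Or.inl ⟨rfl, g2⟩)))
        exact hq ▸ h3 kp hkp hin
      · rw [hb3] at g3
        obtain ⟨kp, hkp, hq, hin⟩ :=
          (pvMatch_iff t 3).mpr (Or.inr (Or.inr (Or.inr (Or.inl ⟨rfl, g3⟩))))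
        exact hq ▸ h3 kp hkp hin
      · rw [hb4] at g4
        obtain ⟨kp, hkp, hq, hin⟩ :=
          (pvMatch_iff t 4).mpr (Or.inr (Or.inr (Or.inr (Or.inr (Or.inl ⟨rfl, g4⟩)))))
        exact hq ▸ h3 kp hkp hin
      · rw [hb5] at g5
        obtain ⟨kp, hkp, hq, hin⟩ :=
          (pvMatch_iff t 5).mpr (Or.inr (Or.inr (Or.inr (Or.inr (Or.inr ⟨rfl, g5⟩)))))
        exact hq ▸ h3 kp hkp hin
      · exact h1
    have hge : cIdx ≤ pvScan t 6 := by
      rcases h2 with h2 | h2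
      · rw [h2, hc]; split_ifs <;> omega
      · rw [pvMatch_iff] at h2
        rcases h2 with ⟨hq, hb⟩|⟨hq, hb⟩|⟨hq, hb⟩|⟨hq, hb⟩|⟨hq, hb⟩|⟨hq, hb⟩
        · rw [← hb0] at hb
          rw [hq, hc]; split_ifs; omega
        · rw [← hb1] at hb
          rw [hq, hc]; split_ifs <;> omega
        · rw [← hb2] at hb
          rw [hq, hc]; split_ifs <;> omega
        · rw [← hb3] at hb
          rw [hq, hc]; split_ifs <;> omega
        · rw [← hb4] at hb
          rw [hq, hc]; split_ifs <;> omega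
        · rw [← hb5] at hb
          rw [hq, hc]; split_ifs <;> omega
    omega
  rw [hscan, hstr, hstr, hstr, hstr, hstr, hstr, ← hb0, ← hb1, ← hb2, ← hb3, ← hb4, ← hb5, hc]
  split_ifs <;> rfl
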